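-- pv_equiv track=rewrite | github.com/ivanwakeup/pycrawl3 | pycrawl3/crawler/crawler.py | sort_links_with_priority
-- ===== SOURCE A (Python) =====
-- def sort_links_with_priority(linkset):
--     def has_contact_word(link):
--         contact_words = ["contact", "about", "sponsor"]
--         for word in contact_words:
--             if word in link:
--                 return 0
--         return 1
--     return list(sorted(linkset, key=has_contact_word))
-- ===== SOURCE B (Python) =====
-- def sort_links_with_priority(linkset):
--     prio = []
--     rest = []
--     add_prio = prio.append
--     add_rest = rest.append
--     for link in linkset:
--         if "contact" in link or "about" in link or "sponsor" in link:
--             add_prio(link)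
--         else:
--             add_rest(link)
--     return prio + rest
-- ===== Notes on version B (the rewrite author's own statement) =====
-- stated objective: faster
-- what changed: Replaces the stable sort on a 0/1 key by a single-pass stable partition into two lists that are concatenated; intended as faster (no sort, no per-element key function call), measured around 1.5-1.8x on large inputs.
import Mathlib
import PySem

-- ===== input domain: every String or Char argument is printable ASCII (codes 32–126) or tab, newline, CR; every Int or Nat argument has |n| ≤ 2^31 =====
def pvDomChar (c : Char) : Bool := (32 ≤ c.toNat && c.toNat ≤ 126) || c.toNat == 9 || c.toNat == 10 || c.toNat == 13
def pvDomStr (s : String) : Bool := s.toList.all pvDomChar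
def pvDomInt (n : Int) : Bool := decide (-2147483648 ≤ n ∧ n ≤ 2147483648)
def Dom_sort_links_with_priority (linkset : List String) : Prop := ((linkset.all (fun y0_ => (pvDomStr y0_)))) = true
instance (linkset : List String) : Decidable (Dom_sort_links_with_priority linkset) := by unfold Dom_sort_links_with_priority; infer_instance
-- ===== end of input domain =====

-- B replaces the stable sort on a 0/1 key by a single-pass stable partition (contact-word links, then the rest).


-- ===== PORT A =====
-- the inner 'for word in contact_words: if word in link: return 0 / return 1' loop
def pvHasContactWordLoop (words : List String) (link : String) : Int :=
  match words with
  | [] => 1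
  | w :: ws => if PySem.Str.isIn w link then 0 else pvHasContactWordLoop ws link

def sort_links_with_priority (linkset : List String) : List String :=
  PySem.List.sorted linkset (fun link => pvHasContactWordLoop ["contact", "about", "sponsor"] link) false

-- ===== PORT B =====
-- '"contact" in link or "about" in link or "sponsor" in link'
def pvIsContact (link : String) : Bool :=
  PySem.Str.isIn "contact" link || PySem.Str.isIn "about" link || PySem.Str.isIn "sponsor" link

def sort_links_with_priority_alt (linkset : List String) : List String :=
  let pr := linkset.foldl
    (fun (acc : List String × List String) link =>
      if pvIsContact link then (acc.1 ++ [link], acc.2) else (acc.1, acc.2 ++ [link]))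
    ([], [])
  pr.1 ++ pr.2

-- ===== PRECONDITION & SPEC =====
def Spec_sort_links_with_priority (linkset : List String) (out : List String) : Prop := out = sort_links_with_priority_alt linkset
instance (linkset : List String) (out : List String) : Decidable (Spec_sort_links_with_priority linkset out) := by unfold Spec_sort_links_with_priority; infer_instance

-- ===== CLAIM (what is proved, stated in full; the proofs are below) =====
def Claim_equal_sort_links_with_priority : Prop := ∀ (linkset : List String), Dom_sort_links_with_priority linkset → Spec_sort_links_with_priority linkset (sort_links_with_priority linkset)

-- ===== LEMMAS AND PROOFS =====

-- A's 0/1 key in terms of B's Boolean predicate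
theorem pvKey_eq (link : String) :
    pvHasContactWordLoop ["contact", "about", "sponsor"] link
      = (if pvIsContact link then (0 : Int) else 1) := by
  simp only [pvHasContactWordLoop, pvIsContact]
  split_ifs <;> simp_all

-- abbreviation for the sort's comparison on the 0/1 key
def pvBefore (a b : String) : Bool :=
  decide ((if pvIsContact a then (0 : Int) else 1) < (if pvIsContact b then (0 : Int) else 1))

theorem pvInsertBy_middle (x : String) (zs os : List String)
    (hz : ∀ z ∈ zs, pvIsContact z = true) (hx : pvIsContact x = true)
    (ho : ∀ o ∈ os, pvIsContact o = false) :
    PySem.List.insertBy pvBefore x (zs ++ os) = zs ++ x :: os := by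
  induction zs with
  | nil =>
    cases os with
    | nil => rfl
    | cons o os' =>
      have := ho o (by simp)
      simp [PySem.List.insertBy, pvBefore, hx, this]
  | cons z zs' ih =>
    have hzc := hz z (by simp)
    have : pvBefore x z = false := by simp [pvBefore, hx, hzc]
    simp only [List.cons_append, PySem.List.insertBy, this, Bool.false_eq_true, if_false]
    exact congrArg (z :: ·) (ih (fun w hw => hz w (by simp [hw])))

theorem pvInsertBy_last (x : String) (ys : List String) (hx : pvIsContact x = false) :
    PySem.List.insertBy pvBefore x ys = ys ++ [x] := by
  apply PySem.List.insertBy_of_forall_not_before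
  intro y _
  simp [pvBefore, hx]
  split <;> omega

-- main invariant: folding insertBy over xs from a partitioned accumulator keeps it partitioned
theorem pvFoldl_insertBy (xs zs os : List String)
    (hz : ∀ z ∈ zs, pvIsContact z = true) (ho : ∀ o ∈ os, pvIsContact o = false) :
    xs.foldl (fun acc x => PySem.List.insertBy pvBefore x acc) (zs ++ os)
      = (zs ++ xs.filter pvIsContact) ++ (os ++ xs.filter (fun x => !pvIsContact x)) := by
  induction xs generalizing zs os with
  | nil => simp
  | cons x xs' ih =>
    simp only [List.foldl_cons]
    by_cases hx : pvIsContact x = true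
    · rw [pvInsertBy_middle x zs os hz hx ho]
      have : zs ++ x :: os = (zs ++ [x]) ++ os := by simp
      rw [this, ih (zs ++ [x]) os
        (by intro z hz'; rcases List.mem_append.mp hz' with h | h
            · exact hz z h
            · simp at h; subst h; exact hx) ho]
      simp [List.filter_cons, hx]
    · have hx' : pvIsContact x = false := by simp at hx; exact hx
      rw [pvInsertBy_last x (zs ++ os) hx']
      have : (zs ++ os) ++ [x] = zs ++ (os ++ [x]) := by simp
      rw [this, ih zs (os ++ [x]) hz
        (by intro o ho'; rcases List.mem_append.mp ho' with h | h
            · exact ho o h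
            · simp at h; subst h; exact hx')]
      simp [List.filter_cons, hx']

-- B's single-pass partition fold computes the two filters
theorem pvFoldl_partition (xs p q : List String) :
    xs.foldl
      (fun (acc : List String × List String) link =>
        if pvIsContact link then (acc.1 ++ [link], acc.2) else (acc.1, acc.2 ++ [link]))
      (p, q)
      = (p ++ xs.filter pvIsContact, q ++ xs.filter (fun x => !pvIsContact x)) := by
  induction xs generalizing p q with
  | nil => simp
  | cons x xs' ih =>
    simp only [List.foldl_cons]
    by_cases hx : pvIsContact x = true
    · rw [if_pos hx, ih]; simp [List.filter_cons, hx]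
    · have hx' : pvIsContact x = false := by simp at hx; exact hx
      rw [if_neg (by simp [hx']), ih]; simp [List.filter_cons, hx']

-- ===== VERDICT (by name: the statement is the Claim_ definition above) =====
theorem sort_links_with_priority_spec : Claim_equal_sort_links_with_priority := by
  intro linkset _
  unfold Spec_sort_links_with_priority sort_links_with_priority sort_links_with_priority_alt
  rw [PySem.List.sorted_eq_foldl_insertBy]
  have hkey : (fun a b : String =>
      decide (pvHasContactWordLoop ["contact", "about", "sponsor"] a
        < pvHasContactWordLoop ["contact", "about", "sponsor"] b)) = pvBefore := by
    funext a b
    simp [pvKey_eq, pvBefore]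
  rw [hkey]
  have := pvFoldl_insertBy linkset [] [] (by simp) (by simp)
  simp only [List.append_nil, List.nil_append] at this ⊢
  rw [this, pvFoldl_partition]
  simp
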